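-- pv_equiv track=rewrite | github.com/naimprince010-ship-it/mini-devin | plodder/sandbox/toolchain_detect.py | pick_default_entry
-- ===== SOURCE A (Python) =====
-- def pick_default_entry(files: dict[str, str]) -> str | None:
--     """Choose a reasonable main file from the snapshot keys."""
--     if not files:
--         return None
--     keys = sorted(files.keys(), key=lambda k: (k.count("/"), k))
--     for prefer in (
--         "main.py",
--         "app.py",
--         "index.js",
--         "index.mjs",
--         "main.ts",
--         "src/main.py",
--         "Program.cs",
--         "Program.fs",
--         "main.java",
--         "index.php",
--         "schema.sql",
--         "migrate.sql",
--     ):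
--         for k in keys:
--             if k.replace("\\", "/").endswith(prefer):
--                 return k.replace("\\", "/")
--     # first python or js
--     for k in keys:
--         low = k.lower()
--         if low.endswith(
--             (
--                 ".py",
--                 ".js",
--                 ".mjs",
--                 ".ts",
--                 ".go",
--                 ".rs",
--                 ".sh",
--                 ".c",
--                 ".cpp",
--                 ".cc",
--                 ".java",
--                 ".php",
--                 ".cs",
--                 ".fs",
--                 ".sql",
--             )
--         ):
--             return k.replace("\\", "/")
--     return keys[0].replace("\\", "/")
-- ===== SOURCE B (Python) =====
-- # B: instead of rescanning the key list once per preference (12 passes) plus an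
-- # extension pass plus a fallback, compute one integer rank per key and take a
-- # single min over the sorted keys.
--
-- _PREFS = (
--     "main.py", "app.py", "index.js", "index.mjs", "main.ts", "src/main.py",
--     "Program.cs", "Program.fs", "main.java", "index.php", "schema.sql",
--     "migrate.sql",
-- )
-- _EXTS = (
--     ".py", ".js", ".mjs", ".ts", ".go", ".rs", ".sh", ".c", ".cpp", ".cc",
--     ".java", ".php", ".cs", ".fs", ".sql",
-- )
--
--
-- def _rank(k: str) -> int:
--     n = k.replace("\\", "/")
--     for i, p in enumerate(_PREFS):
--         if n.endswith(p):
--             return i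
--     return len(_PREFS) if k.lower().endswith(_EXTS) else len(_PREFS) + 1
--
--
-- def pick_default_entry(files: dict[str, str]) -> str | None:
--     """Choose a reasonable main file from the snapshot keys."""
--     if not files:
--         return None
--     keys = sorted(files, key=lambda k: (k.count("/"), k))
--     return min(keys, key=_rank).replace("\\", "/")
-- ===== Notes on version B (the rewrite author's own statement) =====
-- stated objective: alternative
-- what changed: A scans the sorted key list once per preferred filename (12 passes) then an extension pass then a fallback; B computes a single integer rank per key and returns the min-rank key in one pass over the sorted keys.
import Mathlib
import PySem

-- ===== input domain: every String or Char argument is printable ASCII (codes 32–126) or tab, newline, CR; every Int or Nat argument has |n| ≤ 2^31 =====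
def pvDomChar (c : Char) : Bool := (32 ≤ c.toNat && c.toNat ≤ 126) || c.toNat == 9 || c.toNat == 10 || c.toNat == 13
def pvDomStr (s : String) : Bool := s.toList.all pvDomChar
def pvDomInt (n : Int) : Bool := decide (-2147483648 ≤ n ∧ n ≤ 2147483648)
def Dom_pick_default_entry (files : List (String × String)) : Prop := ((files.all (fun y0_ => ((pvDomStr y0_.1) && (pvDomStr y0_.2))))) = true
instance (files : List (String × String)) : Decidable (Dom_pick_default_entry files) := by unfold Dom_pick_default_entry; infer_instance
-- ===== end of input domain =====

-- B replaces A's sequential scans (one pass per preferred name, then an extension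
-- pass, then a fallback) by one integer rank per key and a single min; same results.

-- ===== PORT A =====
-- the preference tuple and the extension tuple from the Python source (shared data)
def pvPrefs : List String :=
  ["main.py", "app.py", "index.js", "index.mjs", "main.ts", "src/main.py",
   "Program.cs", "Program.fs", "main.java", "index.php", "schema.sql", "migrate.sql"]
def pvExts : List String :=
  [".py", ".js", ".mjs", ".ts", ".go", ".rs", ".sh", ".c", ".cpp", ".cc",
   ".java", ".php", ".cs", ".fs", ".sql"]

def pick_default_entry (files : List (String × String)) : Option String :=
  if files = [] then none    -- `if not files`
  else
    let keys := PySem.List.sorted2 (PySem.Dict.ofList files).keys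
      (fun k => PySem.Str.count k "/") (fun k => k)
    -- for prefer in (...): for k in keys: if k.replace("\\","/").endswith(prefer): return k.replace("\\","/")
    match pvPrefs.findSome?
        (fun p => keys.find? (fun k => PySem.Str.endswith (PySem.Str.replace k "\\" "/") p)) with
    | some k => some (PySem.Str.replace k "\\" "/")
    | none =>
      -- for k in keys: if k.lower().endswith((...)): return k.replace("\\","/")
      match keys.find? (fun k => pvExts.any (fun e => PySem.Str.endswith (PySem.Str.lower k) e)) with
      | some k => some (PySem.Str.replace k "\\" "/")
      | none => (PySem.List.pyGet? keys 0).map (fun k => PySem.Str.replace k "\\" "/")  -- keys[0]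

-- ===== PORT B =====
-- _rank from Source B: index of the first matching preference, else len(PREFS) / len(PREFS)+1
def pvRank (k : String) : Nat :=
  let n := PySem.Str.replace k "\\" "/"
  match pvPrefs.findIdx? (fun p => PySem.Str.endswith n p) with
  | some i => i
  | none =>
      if pvExts.any (fun e => PySem.Str.endswith (PySem.Str.lower k) e)
      then pvPrefs.length else pvPrefs.length + 1

def pick_default_entry_alt (files : List (String × String)) : Option String :=
  if files = [] then none
  else
    let keys := PySem.List.sorted2 (PySem.Dict.ofList files).keys
      (fun k => PySem.Str.count k "/") (fun k => k)
    (PySem.List.min? keys pvRank).map (fun k => PySem.Str.replace k "\\" "/")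

-- ===== PRECONDITION & SPEC =====
def Spec_pick_default_entry (files : List (String × String)) (out : Option String) : Prop := out = pick_default_entry_alt files
instance (files : List (String × String)) (out : Option String) : Decidable (Spec_pick_default_entry files out) := by unfold Spec_pick_default_entry; infer_instance

-- ===== CLAIM (what is proved, stated in full; the proofs are below) =====
def Claim_equal_pick_default_entry : Prop := ∀ (files : List (String × String)), Dom_pick_default_entry files → Spec_pick_default_entry files (pick_default_entry files)

-- ===== LEMMAS AND PROOFS =====

-- abbreviations for the two tests (proof-side only)
def mP (k p : String) : Bool := PySem.Str.endswith (PySem.Str.replace k "\\" "/") p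
def eB (k : String) : Bool := pvExts.any (fun e => PySem.Str.endswith (PySem.Str.lower k) e)

lemma pvRank_eq (k : String) :
    pvRank k = match pvPrefs.findIdx? (mP k) with
      | some i => i
      | none => if eB k then pvPrefs.length else pvPrefs.length + 1 := rfl

-- A's result before the final normalisation
def preA (keys : List String) : Option String :=
  match pvPrefs.findSome? (fun p => keys.find? (fun k => mP k p)) with
  | some k => some k
  | none =>
    match keys.find? eB with
    | some k => some k
    | none => PySem.List.pyGet? keys 0

-- A's match expression is preA followed by the normalisation
lemma shapeA (keys : List String) :
    (match pvPrefs.findSome? (fun p => keys.find? (fun k => mP k p)) with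
     | some k => some (PySem.Str.replace k "\\" "/")
     | none =>
       match keys.find? eB with
       | some k => some (PySem.Str.replace k "\\" "/")
       | none => (PySem.List.pyGet? keys 0).map (fun k => PySem.Str.replace k "\\" "/"))
    = (preA keys).map (fun k => PySem.Str.replace k "\\" "/") := by
  unfold preA
  cases pvPrefs.findSome? (fun p => keys.find? (fun k => mP k p)) with
  | some k => rfl
  | none =>
    cases keys.find? eB with
    | some k => rfl
    | none => rfl

-- generic: findSome? is find?-then-apply
lemma findSome?_eq_bind {α β : Type} (f : α → Option β) (l : List α) :
    l.findSome? f = (l.find? (fun a => (f a).isSome)).bind f := by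
  induction l with
  | nil => rfl
  | cons a l ih =>
    cases h : f a with
    | none => simp [h, ih]
    | some b => simp [h]

lemma findIdx?_append_len {α : Type} (p : α → Bool) (as : List α) (b : α) (bs : List α)
    (h1 : ∀ a ∈ as, p a = false) (h2 : p b = true) :
    List.findIdx? p (as ++ b :: bs) = some as.length := by
  induction as with
  | nil => simp [List.findIdx?_cons, h2]
  | cons x xs ih =>
    have hx := h1 x (by simp)
    simp only [List.cons_append, List.findIdx?_cons, hx]
    rw [ih (fun a ha => h1 a (by simp [ha]))]
    rfl

lemma findIdx?_some_getElem {α : Type} (p : α → Bool) :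
    ∀ (l : List α) (j : Nat), List.findIdx? p l = some j →
      ∃ h : j < l.length, p (l[j]'h) = true := by
  intro l
  induction l with
  | nil => intro j h; simp [List.findIdx?_nil] at h
  | cons x xs ih =>
    intro j h
    by_cases hx : p x = true
    · simp [List.findIdx?_cons, hx] at h
      subst h
      exact ⟨by simp, hx⟩
    · simp only [Bool.not_eq_true] at hx
      simp [List.findIdx?_cons, hx] at h
      obtain ⟨j', hj', rfl⟩ := h
      obtain ⟨hlt, hp⟩ := ih j' hj'
      exact ⟨by simpa using Nat.succ_lt_succ hlt, by simpa using hp⟩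

lemma find?_congr_mem {α : Type} (p q : α → Bool) :
    ∀ (l : List α), (∀ x ∈ l, p x = q x) → l.find? p = l.find? q := by
  intro l
  induction l with
  | nil => intro _; rfl
  | cons x xs ih =>
    intro h
    have hx := h x (by simp)
    simp only [List.find?_cons, hx]
    cases q x
    · exact ih (fun a ha => h a (by simp [ha]))
    · rfl

-- the accumulator step of PySem.List.min?
def mstep {α : Type} (f : α → Nat) (acc : Option α) (x : α) : Option α :=
  match acc with
  | none => some x
  | some m => if f x < f m then some x else some m

lemma min?_eq_foldl {α : Type} (f : α → Nat) (l : List α) :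
    PySem.List.min? l f = l.foldl (mstep f) none := rfl

lemma foldl_mstep_stay {α : Type} (f : α → Nat) (v : Nat) :
    ∀ (l : List α) (m : α), f m = v → (∀ k ∈ l, v ≤ f k) →
      l.foldl (mstep f) (some m) = some m := by
  intro l
  induction l with
  | nil => intro m _ _; rfl
  | cons x xs ih =>
    intro m hm hall
    have hx : ¬ f x < f m := by
      have := hall x (by simp); omega
    simp only [List.foldl_cons, mstep, if_neg hx]
    exact ih m hm (fun k hk => hall k (by simp [hk]))

lemma foldl_mstep_find {α : Type} (f : α → Nat) (v : Nat) :
    ∀ (l : List α) (m : α), v < f m → (∀ k ∈ l, v ≤ f k) → (∃ k ∈ l, f k = v) →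
      l.foldl (mstep f) (some m) = l.find? (fun k => f k == v) := by
  intro l
  induction l with
  | nil => intro m _ _ hex; simp at hex
  | cons x xs ih =>
    intro m hm hall hex
    by_cases hx : f x = v
    · have hlt : f x < f m := by omega
      simp only [List.foldl_cons, mstep, if_pos hlt, List.find?_cons,
        show (f x == v) = true by simp [hx]]
      exact foldl_mstep_stay f v xs x hx (fun k hk => hall k (by simp [hk]))
    · have hex' : ∃ k ∈ xs, f k = v := by
        obtain ⟨k, hk, hkv⟩ := hex
        rcases List.mem_cons.1 hk with rfl | hk
        · exact absurd hkv hx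
        · exact ⟨k, hk, hkv⟩
      have hall' : ∀ k ∈ xs, v ≤ f k := fun k hk => hall k (by simp [hk])
      have hxv : v < f x := by
        have := hall x (by simp); omega
      simp only [List.foldl_cons, mstep, List.find?_cons,
        show (f x == v) = false by simp [hx]]
      by_cases hlt : f x < f m
      · simp only [if_pos hlt]; exact ih x hxv hall' hex'
      · simp only [if_neg hlt]; exact ih m hm hall' hex'

lemma min?_eq_find?_of {α : Type} (f : α → Nat) (v : Nat) (l : List α)
    (hall : ∀ k ∈ l, v ≤ f k) (hex : ∃ k ∈ l, f k = v) :
    PySem.List.min? l f = l.find? (fun k => f k == v) := by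
  cases l with
  | nil => rfl
  | cons x xs =>
    rw [min?_eq_foldl]
    simp only [List.foldl_cons]
    show xs.foldl (mstep f) (some x) = _
    by_cases hx : f x = v
    · rw [List.find?_cons, show (f x == v) = true by simp [hx]]
      exact foldl_mstep_stay f v xs x hx (fun k hk => hall k (by simp [hk]))
    · have hxv : v < f x := by have := hall x (by simp); omega
      rw [List.find?_cons, show (f x == v) = false by simp [hx]]
      refine (foldl_mstep_find f v xs x hxv (fun k hk => hall k (by simp [hk])) ?_)
      obtain ⟨k, hk, hkv⟩ := hex
      rcases List.mem_cons.1 hk with rfl | hk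
      · exact absurd hkv hx
      · exact ⟨k, hk, hkv⟩

lemma pvPrefs_length : pvPrefs.length = 12 := rfl

-- the core equivalence, over an arbitrary key list
lemma core (keys : List String) :
    preA keys = PySem.List.min? keys pvRank := by
  unfold preA
  rw [findSome?_eq_bind]
  cases hfind : pvPrefs.find? (fun p => ((keys.find? (fun k => mP k p)).isSome)) with
  | some pstar =>
    rw [List.find?_eq_some_iff_append] at hfind
    obtain ⟨hsome, as, bs, hsplit, hforall⟩ := hfind
    obtain ⟨kstar, hk⟩ := Option.isSome_iff_exists.1 hsome
    have hkstar_mem : kstar ∈ keys := List.mem_of_find?_eq_some hk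
    have hkstar_m : mP kstar pstar = true := by
      have := List.find?_some hk; simpa using this
    have hno : ∀ a ∈ as, ∀ k ∈ keys, mP k a = false := by
      intro a ha k hkmem
      have := hforall a ha
      simp only [Bool.not_eq_eq_eq_not, Bool.not_true, Option.isSome_eq_false_iff,
        Option.isNone_iff_eq_none] at this
      have hnone : keys.find? (fun k => mP k a) = none := by
        simpa using this
      have := List.find?_eq_none.1 hnone k hkmem
      simpa using this
    have hlen : as.length + bs.length + 1 = 12 := by
      have h := congrArg List.length hsplit
      simp only [List.length_append, List.length_cons, pvPrefs_length] at h
      omega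
    have hrank_match : ∀ k ∈ keys, mP k pstar = true → pvRank k = as.length := by
      intro k hkm hm
      rw [pvRank_eq, hsplit, findIdx?_append_len (mP k) as pstar bs
        (fun a ha => hno a ha k hkm) hm]
    have hrank_ge : ∀ k ∈ keys, as.length ≤ pvRank k := by
      intro k hkm
      rw [pvRank_eq]
      cases hIdx : pvPrefs.findIdx? (mP k) with
      | none =>
        show as.length ≤ (if eB k = true then pvPrefs.length else pvPrefs.length + 1)
        have h11 : as.length < 12 := by omega
        simp only [pvPrefs_length]
        split <;> omega
      | some j =>
        show as.length ≤ j
        by_contra hcon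
        have hlt : j < as.length := by omega
        rw [hsplit] at hIdx
        obtain ⟨hjlt, hpj⟩ := findIdx?_some_getElem (mP k) (as ++ pstar :: bs) j hIdx
        rw [List.getElem_append_left hlt] at hpj
        exact absurd hpj (by simp [hno _ (List.getElem_mem hlt) k hkm])
    have hrank_iff : ∀ k ∈ keys, (pvRank k == as.length) = mP k pstar := by
      intro k hkm
      by_cases hm : mP k pstar = true
      · simp [hrank_match k hkm hm, hm]
      · simp only [Bool.not_eq_true] at hm
        rw [hm]
        simp only [beq_eq_false_iff_ne, ne_eq]
        intro hr
        rw [pvRank_eq] at hr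
        cases hIdx : pvPrefs.findIdx? (mP k) with
        | none =>
          rw [hIdx] at hr
          have hr' : (if eB k = true then pvPrefs.length else pvPrefs.length + 1) = as.length := hr
          have h11 : as.length < 12 := by omega
          simp only [pvPrefs_length] at hr'
          split at hr' <;> omega
        | some j =>
          rw [hIdx] at hr
          have hrj : j = as.length := hr
          rw [hsplit] at hIdx
          obtain ⟨hjlt, hpj⟩ := findIdx?_some_getElem (mP k) (as ++ pstar :: bs) j hIdx
          subst hrj
          rw [show (as ++ pstar :: bs)[as.length]'hjlt = pstar from
            List.getElem_of_append rfl rfl] at hpj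
          rw [hm] at hpj
          exact Bool.false_ne_true hpj
    have hex : ∃ k ∈ keys, pvRank k = as.length :=
      ⟨kstar, hkstar_mem, hrank_match kstar hkstar_mem hkstar_m⟩
    rw [min?_eq_find?_of pvRank as.length keys hrank_ge hex,
      find?_congr_mem (fun k => pvRank k == as.length) (fun k => mP k pstar) keys hrank_iff]
    simp [hk]
  | none =>
    have hnone : ∀ p ∈ pvPrefs, keys.find? (fun k => mP k p) = none := by
      intro p hp
      have := List.find?_eq_none.1 hfind p hp
      simpa [Option.isSome_eq_false_iff, Option.isNone_iff_eq_none] using this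
    have hIdxnone : ∀ k ∈ keys, pvPrefs.findIdx? (mP k) = none := by
      intro k hkm
      rw [List.findIdx?_eq_none_iff]
      intro p hp
      have := List.find?_eq_none.1 (hnone p hp) k hkm
      simpa using this
    have hrank_ext : ∀ k ∈ keys, pvRank k = if eB k then 12 else 13 := by
      intro k hkm
      rw [pvRank_eq, hIdxnone k hkm]
      simp [pvPrefs_length]
    simp only [Option.bind_none]
    cases hext : keys.find? eB with
    | some k0 =>
      have hk0mem : k0 ∈ keys := List.mem_of_find?_eq_some hext
      have hk0e : eB k0 = true := List.find?_some hext
      have hall : ∀ k ∈ keys, 12 ≤ pvRank k := by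
        intro k hkm; rw [hrank_ext k hkm]; split <;> omega
      have hex : ∃ k ∈ keys, pvRank k = 12 :=
        ⟨k0, hk0mem, by rw [hrank_ext k0 hk0mem, if_pos hk0e]⟩
      rw [min?_eq_find?_of pvRank 12 keys hall hex,
        find?_congr_mem (fun k => pvRank k == 12) eB keys (by
          intro k hkm
          show (pvRank k == 12) = eB k
          rw [hrank_ext k hkm]
          by_cases he : eB k = true
          · simp [he]
          · simp only [Bool.not_eq_true] at he; simp [he]), hext]
    | none =>
      have hnoe : ∀ k ∈ keys, eB k = false := by
        intro k hkm
        have := List.find?_eq_none.1 hext k hkm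
        simpa using this
      cases keys with
      | nil => rfl
      | cons k ks =>
        have hall : ∀ x ∈ (k :: ks), 13 ≤ pvRank x := by
          intro x hx; rw [hrank_ext x hx, if_neg (by simp [hnoe x hx])]
        have hex : ∃ x ∈ (k :: ks), pvRank x = 13 :=
          ⟨k, by simp, by rw [hrank_ext k (by simp), if_neg (by simp [hnoe k (by simp)])]⟩
        rw [min?_eq_find?_of pvRank 13 (k :: ks) hall hex]
        rw [List.find?_cons, show (pvRank k == 13) = true by
          simp [hrank_ext k (List.mem_cons_self), hnoe k List.mem_cons_self]]
        simp [PySem.List.pyGet?, PySem.List.pyIdx?]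

-- ===== VERDICT (by name: the statement is the Claim_ definition above) =====
theorem pick_default_entry_spec : Claim_equal_pick_default_entry := by
  intro files _
  unfold Spec_pick_default_entry pick_default_entry pick_default_entry_alt
  by_cases h : files = []
  · simp [h]
  · simp only [if_neg h]
    exact (shapeA _).trans (congrArg _ (core _))
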